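-- pv_equiv track=rewrite | github.com/mjc578/AI-Project-Machine-Learning | common_methods_lib.py | densityFeatures
-- ===== SOURCE A (Python) =====
-- def densityFeatures(imageLines):
--     blackPixels = 0
--     whitePixels = 0
--     for line in imageLines:
--         for char in line:
--             if char != ' ':
--                 blackPixels += 1
--             else:
--                 whitePixels += 1
--
--     return (blackPixels, whitePixels)
-- ===== SOURCE B (Python) =====
-- def densityFeatures(imageLines):
--     whitePixels = sum(line.count(' ') for line in imageLines)
--     total = sum(len(line) for line in imageLines)
--     return (total - whitePixels, whitePixels)
-- ===== Notes on version B (the rewrite author's own statement) =====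
-- stated objective: simpler
-- what changed: B maintains only the space count and the aggregate length (via sums of line.count(' ') and len(line)) and derives blackPixels by subtraction, instead of A's per-character double counter loop.
import Mathlib
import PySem

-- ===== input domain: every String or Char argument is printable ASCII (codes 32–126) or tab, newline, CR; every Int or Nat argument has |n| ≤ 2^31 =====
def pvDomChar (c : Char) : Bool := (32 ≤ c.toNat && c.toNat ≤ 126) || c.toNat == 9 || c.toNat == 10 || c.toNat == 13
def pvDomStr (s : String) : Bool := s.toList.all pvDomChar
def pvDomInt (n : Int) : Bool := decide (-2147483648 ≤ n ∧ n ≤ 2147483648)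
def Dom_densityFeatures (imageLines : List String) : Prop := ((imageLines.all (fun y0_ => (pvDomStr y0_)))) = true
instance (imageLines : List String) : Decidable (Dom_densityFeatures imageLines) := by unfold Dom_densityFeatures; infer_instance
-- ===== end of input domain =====

-- B keeps only the white (space) count and the total length, deriving black by subtraction (simpler decomposition).
-- ===== PORT A =====
def densityFeatures (imageLines : List String) : Int × Int :=
  imageLines.foldl
    (fun (bw : Int × Int) line =>
      line.toList.foldl
        (fun (bw : Int × Int) ch =>
          if ch ≠ ' ' then (bw.1 + 1, bw.2) else (bw.1, bw.2 + 1))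
        bw)
    ((0 : Int), (0 : Int))

-- ===== PORT B =====
def densityFeatures_alt (imageLines : List String) : Int × Int :=
  let whitePixels : Int := (imageLines.map (fun line => (PySem.Str.count line " " : Int))).sum
  let total : Int := (imageLines.map (fun line => PySem.Str.len line)).sum
  (total - whitePixels, whitePixels)

-- ===== PRECONDITION & SPEC =====
def Spec_densityFeatures (imageLines : List String) (out : Int × Int) : Prop := out = densityFeatures_alt imageLines
instance (imageLines : List String) (out : Int × Int) : Decidable (Spec_densityFeatures imageLines out) := by unfold Spec_densityFeatures; infer_instance

-- ===== CLAIM (what is proved, stated in full; the proofs are below) =====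
def Claim_equal_densityFeatures : Prop := ∀ (imageLines : List String), Dom_densityFeatures imageLines → Spec_densityFeatures imageLines (densityFeatures imageLines)

-- ===== LEMMAS AND PROOFS =====

theorem count_go_singleton (c : Char) (l : List Char) (fuel acc : Nat)
    (h : l.length ≤ fuel) :
    PySem.Chars.count.go [c] fuel l acc = acc + l.count c := by
  induction l generalizing fuel acc with
  | nil => cases fuel <;> simp [PySem.Chars.count.go]
  | cons x t ih =>
    cases fuel with
    | zero => simp at h
    | succ f =>
      have hf : t.length ≤ f := by simpa using h
      by_cases hx : c = x
      · subst hx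
        simp [PySem.Chars.count.go, List.isPrefixOf, ih _ _ hf]
        omega
      · simp [PySem.Chars.count.go, List.isPrefixOf, Ne.symm hx, hx, ih _ _ hf]

theorem chars_count_singleton (c : Char) (s : List Char) :
    PySem.Chars.count s [c] = s.count c := by
  simp [PySem.Chars.count, count_go_singleton c s s.length 0 le_rfl]

theorem inner_foldl (cs : List Char) (b w : Int) :
    cs.foldl
      (fun (bw : Int × Int) ch =>
        if ch ≠ ' ' then (bw.1 + 1, bw.2) else (bw.1, bw.2 + 1))
      (b, w)
    = (b + (cs.countP (fun ch => ch ≠ ' ') : Int), w + (cs.count ' ' : Int)) := by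
  induction cs generalizing b w with
  | nil => simp
  | cons x t ih =>
    simp only [List.foldl_cons]
    by_cases hx : x = ' '
    · subst hx
      rw [if_neg (by simp), ih]
      simp [Prod.ext_iff, List.countP_cons, List.count_cons]
      omega
    · rw [if_pos (by simp [hx]), ih]
      simp [Prod.ext_iff, List.countP_cons, hx]
      omega

theorem outer_foldl (lines : List String) (b w : Int) :
    lines.foldl
      (fun (bw : Int × Int) line =>
        line.toList.foldl
          (fun (bw : Int × Int) ch =>
            if ch ≠ ' ' then (bw.1 + 1, bw.2) else (bw.1, bw.2 + 1))
          bw)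
      (b, w)
    = (b + ((lines.map (fun l => l.toList.countP (fun ch => ch ≠ ' '))).sum : Int),
       w + ((lines.map (fun l => l.toList.count ' ')).sum : Int)) := by
  induction lines generalizing b w with
  | nil => simp
  | cons l t ih =>
    simp only [List.foldl_cons, List.map_cons, List.sum_cons]
    rw [inner_foldl, ih]
    simp [Prod.ext_iff]
    constructor <;> omega

theorem countP_add_count (l : List Char) :
    l.countP (fun ch => ch ≠ ' ') + l.count ' ' = l.length := by
  induction l with
  | nil => simp
  | cons x t ih =>
    simp only [ne_eq, decide_not] at ih ⊢
    by_cases hx : x = ' ' <;>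
      simp [List.count_cons, hx] <;> omega

theorem sums_split (lines : List String) :
    ((lines.map (fun l => ((l.toList.countP (fun ch => ch ≠ ' ') : Nat) : Int))).sum)
  = ((lines.map (fun l => ((l.toList.length : Nat) : Int))).sum)
    - ((lines.map (fun l => ((l.toList.count ' ' : Nat) : Int))).sum) := by
  induction lines with
  | nil => simp
  | cons l t ih =>
    have h := countP_add_count l.toList
    simp only [List.map_cons, List.sum_cons, ih]
    omega

-- ===== VERDICT (by name: the statement is the Claim_ definition above) =====
theorem densityFeatures_spec : Claim_equal_densityFeatures := by
  intro lines _
  unfold Spec_densityFeatures densityFeatures densityFeatures_alt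
  rw [outer_foldl]
  have hone : (" " : String).toList = [' '] := by decide
  simp only [PySem.Str.count_eq, PySem.Str.len_eq, hone, chars_count_singleton,
    Prod.mk.injEq, zero_add]
  exact ⟨sums_split lines, trivial⟩
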